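-- pv_equiv track=rewrite | github.com/hiparkgss/Project_Euler_coding_practice | problem_51.py | change_digit
-- ===== SOURCE A (Python) =====
-- def index(l, m):
--     """
--
--     :param l: list
--     :param m: an element in the list l
--     :return: index of m (could be multiple)
--
--     """
--     if m not in l:
--         raise ValueError('second argument is not in the first argument number')
--
--     return [i for i, j in enumerate(l) if j == m]
--
-- def list_to_int(l):
--     """
--
--     :param l: list with single digit integer
--     :return: make a integer with list
--     """
--     for elem in l:
--         if not len(str(elem)) == 1:
--             raise ValueError('not a single digit element list')
--         elif not type(elem) == int:
--             raise ValueError('a single digit element is not integer type')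
--
--     l1 = reversed(l)
--     return sum(10 ** i * j for i, j in enumerate(l1))
--
-- def change_digit(n, m):
--     """
--
--     :param n: integer number input
--     :param m: a 1-digit number that is going to be changed
--     :return: possible numbers
--
--     """
--     result = []
--     l = [int(elem) for elem in list(str(n))]
--     if m not in l:
--         raise ValueError('second argument is not in the first argument number')
--     il = index(l, m)
--
--     for j in range(10):
--         for ind in il:
--             l[ind] = j
--         result.append(list_to_int(l))
--
--     return result
-- ===== SOURCE B (Python) =====
-- def change_digit(n, m):
--     digits = [int(c) for c in str(n)]
--     if m not in digits:
--         raise ValueError('second argument is not in the first argument number')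
--     base = 0
--     weight = 0
--     for d in digits:
--         base = 10 * base + (0 if d == m else d)
--         weight = 10 * weight + (1 if d == m else 0)
--     return [base + j * weight for j in range(10)]
-- ===== Notes on version B (the rewrite author's own statement) =====
-- stated objective: alternative
-- what changed: Instead of 10 rounds of in-place digit replacement each followed by a full reversed-enumerate power-sum rebuild, B computes in one pass over the digits a base (n with all m-digits zeroed) and a weight (sum of place values of the m-positions) and returns [base + j*weight for j in range(10)] as a closed form.
import Mathlib
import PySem

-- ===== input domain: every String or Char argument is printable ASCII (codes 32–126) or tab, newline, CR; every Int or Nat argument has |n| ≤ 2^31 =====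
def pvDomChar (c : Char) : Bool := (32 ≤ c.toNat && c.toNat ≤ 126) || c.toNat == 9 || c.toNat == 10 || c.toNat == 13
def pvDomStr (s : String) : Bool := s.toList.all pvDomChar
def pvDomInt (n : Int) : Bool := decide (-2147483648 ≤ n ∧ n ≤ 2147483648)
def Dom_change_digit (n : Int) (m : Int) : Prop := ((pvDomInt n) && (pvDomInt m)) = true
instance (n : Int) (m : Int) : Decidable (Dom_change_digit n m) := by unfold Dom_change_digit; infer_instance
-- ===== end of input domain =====

-- B replaces A's 10 mutate-and-rebuild passes by one pass computing base & weight and the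
-- closed form [base + j*weight | j < 10]; objective: alternative (different algorithm).

-- ===== PORT A =====
-- l = [int(elem) for elem in list(str(n))]   (int('-') raises for n < 0: outside Pre_, getD 0 there)
def pvDigits (n : Int) : List Int :=
  (PySem.Int.toChars n).map (fun c => (PySem.Int.ofChars? [c]).getD 0)

-- helper index(l, m): the 'm not in l' raise happens only outside Pre_; here the comprehension
def pvIndexA (l : List Int) (m : Int) : List Int :=
  ((PySem.List.enumerate l 0).filter (fun p => p.2 == m)).map (fun p => p.1)

-- helper list_to_int(l): the validation loop either raises (unreachable under Pre_: every
-- element is a digit produced by int(c) or a j ∈ range(10)) or does nothing; then the sum.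
def pvListToInt (l : List Int) : Int :=
  ((PySem.List.enumerate l.reverse 0).map (fun p => 10 ^ p.1.toNat * p.2)).sum

def change_digit (n : Int) (m : Int) : List Int :=
  let l := pvDigits n
  -- 'if m not in l: raise ValueError' : outside Pre_
  let il := pvIndexA l m
  ((PySem.List.pyRange 0 10 1).foldl
    (fun (st : List Int × List Int) j =>
      let l' := il.foldl (fun lc ind => PySem.List.pySetD lc ind j) st.1  -- l[ind] = j (indices from enumerate: in range)
      (l', st.2 ++ [pvListToInt l'])) (l, [])).2

-- ===== PORT B =====
def change_digit_alt (n : Int) (m : Int) : List Int :=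
  let digits := pvDigits n
  -- 'if m not in digits: raise ValueError' : outside Pre_
  let bw := digits.foldl
    (fun (p : Int × Int) d =>
      (10 * p.1 + (if d == m then 0 else d), 10 * p.2 + (if d == m then 1 else 0))) (0, 0)
  (PySem.List.pyRange 0 10 1).map (fun j => bw.1 + j * bw.2)

-- ===== PRECONDITION & SPEC =====
-- Pre_ excludes exactly the inputs on which the Python A raises ValueError (both B and A do):
-- n < 0 (int('-') on the sign character) and m not among the digits of n.
def Pre_change_digit (n : Int) (m : Int) : Prop := 0 ≤ n ∧ m ∈ pvDigits n
instance (n : Int) (m : Int) : Decidable (Pre_change_digit n m) := by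
  unfold Pre_change_digit; infer_instance

def pvWitness_change_digit : Int × Int := (120, 0)

def Spec_change_digit (n : Int) (m : Int) (out : List Int) : Prop := out = change_digit_alt n m
instance (n : Int) (m : Int) (out : List Int) : Decidable (Spec_change_digit n m out) := by
  unfold Spec_change_digit; infer_instance

-- ===== CLAIM (what is proved, stated in full; the proofs are below) =====
def Claim_equal_change_digit : Prop :=
  ∀ (n : Int) (m : Int), Dom_change_digit n m → Pre_change_digit n m →
    Spec_change_digit n m (change_digit n m)

-- ===== LEMMAS AND PROOFS =====

-- substitute digit d by j at the m-positions
def pvSub (m j d : Int) : Int := if d == m then j else d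

-- little-endian value of a digit list
def pvLE : List Int → Int
  | [] => 0
  | d :: t => d + 10 * pvLE t

theorem pvSub_self (m : Int) (l : List Int) : l.map (pvSub m m) = l := by
  induction l with
  | nil => rfl
  | cons d t ih => simp [pvSub, ih]; intro h; simpa using h.symm

theorem pv_set_append (pre : List Int) (x : Int) (rest : List Int) (v : Int) :
    (pre ++ x :: rest).set pre.length v = pre ++ v :: rest := by
  induction pre with
  | nil => rfl
  | cons a p ih => simp [ih]

-- L1 (generalized): applying A's inner mutation loop (indices of the m-positions of l0,
-- shifted by pre.length) to pre ++ l0.map (pvSub m j') yields pre ++ l0.map (pvSub m j).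
theorem pv_setAll (m j : Int) (l0 : List Int) :
    ∀ (pre : List Int) (j' : Int),
      (((PySem.List.enumerate l0 (pre.length : Int)).filter (fun p => p.2 == m)).map
          (fun p => p.1)).foldl
        (fun lc ind => PySem.List.pySetD lc ind j) (pre ++ l0.map (pvSub m j'))
      = pre ++ l0.map (pvSub m j) := by
  induction l0 with
  | nil => intro pre j'; simp [PySem.List.enumerate_nil]
  | cons d t ih =>
    intro pre j'
    rw [PySem.List.enumerate_cons]
    by_cases hdm : d = m
    · subst hdm
      simp only [List.filter_cons, beq_self_eq_true, if_true, List.map_cons,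
        List.foldl_cons, pvSub]
      rw [PySem.List.pySetD_natCast, pv_set_append]
      have h2 := ih (pre ++ [j]) j'
      simp only [List.length_append, List.length_cons, List.length_nil,
        List.append_assoc, List.cons_append, List.nil_append] at h2 ⊢
      rw [show ((pre.length : Int) + 1) = ((pre.length + 1 : Nat) : Int) by push_cast; ring]
      exact h2
    · have hne : (d == m) = false := by simp [hdm]
      simp only [List.filter_cons, hne, Bool.false_eq_true, if_false, List.map_cons]
      rw [show pvSub m j' d = d by simp [pvSub, hdm], show pvSub m j d = d by simp [pvSub, hdm]]
      have h2 := ih (pre ++ [d]) j'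
      simp only [List.length_append, List.length_cons, List.length_nil, Nat.zero_add,
        List.append_assoc, List.cons_append, List.nil_append] at h2
      rw [show ((pre.length : Int) + 1) = ((pre.length + 1 : Nat) : Int) by push_cast; ring]
      exact h2

theorem pv_setAll0 (m j j' : Int) (l0 : List Int) :
    (pvIndexA l0 m).foldl (fun lc ind => PySem.List.pySetD lc ind j) (l0.map (pvSub m j'))
      = l0.map (pvSub m j) := by
  have := pv_setAll m j l0 [] j'
  simpa [pvIndexA] using this

-- enumerate power sum = 10^s * little-endian value
theorem pv_enum_sum (r : List Int) : ∀ (s : Nat),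
    ((PySem.List.enumerate r (s : Int)).map (fun p => 10 ^ p.1.toNat * p.2)).sum
      = 10 ^ s * pvLE r := by
  induction r with
  | nil => intro s; simp [PySem.List.enumerate_nil, pvLE]
  | cons d t ih =>
    intro s
    rw [PySem.List.enumerate_cons]
    have hs : ((s : Int) + 1) = ((s + 1 : Nat) : Int) := by push_cast; ring
    simp only [List.map_cons, List.sum_cons, hs, ih (s + 1), pvLE, Int.toNat_natCast]
    ring

theorem pvLE_append (r : List Int) (d : Int) :
    pvLE (r ++ [d]) = pvLE r + d * 10 ^ r.length := by
  induction r with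
  | nil => simp [pvLE]
  | cons a t ih => simp [pvLE, ih]; ring

theorem pv_horner (l : List Int) : ∀ (a : Int),
    l.foldl (fun a d => 10 * a + d) a = a * 10 ^ l.length + pvLE l.reverse := by
  induction l with
  | nil => intro a; simp [pvLE]
  | cons d t ih =>
    intro a
    simp only [List.foldl_cons, ih, List.reverse_cons, pvLE_append, List.length_cons,
      List.length_reverse]
    ring

theorem pv_listToInt_horner (l : List Int) :
    pvListToInt l = l.foldl (fun a d => 10 * a + d) 0 := by
  have h := pv_enum_sum l.reverse 0
  simp only [Nat.cast_zero, pow_zero, one_mul] at h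
  rw [pvListToInt, h, pv_horner]
  ring

-- L2: horner value of the substituted list, from B's base/weight fold
theorem pv_value (m j : Int) (l0 : List Int) : ∀ (a b w : Int), a = b + j * w →
    (l0.map (pvSub m j)).foldl (fun a d => 10 * a + d) a
      = (l0.foldl (fun (p : Int × Int) d =>
            (10 * p.1 + (if d == m then 0 else d), 10 * p.2 + (if d == m then 1 else 0))) (b, w)).1
        + j * (l0.foldl (fun (p : Int × Int) d =>
            (10 * p.1 + (if d == m then 0 else d), 10 * p.2 + (if d == m then 1 else 0))) (b, w)).2 := by
  induction l0 with
  | nil => intro a b w h; simpa using h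
  | cons d t ih =>
    intro a b w h
    simp only [List.map_cons, List.foldl_cons]
    by_cases hdm : d = m
    · apply ih
      simp [pvSub, hdm, h]; ring
    · apply ih
      simp [pvSub, hdm, h]; ring

theorem pv_listToInt_sub (m j : Int) (l0 : List Int) :
    pvListToInt (l0.map (pvSub m j))
      = (l0.foldl (fun (p : Int × Int) d =>
            (10 * p.1 + (if d == m then 0 else d), 10 * p.2 + (if d == m then 1 else 0))) (0, 0)).1
        + j * (l0.foldl (fun (p : Int × Int) d =>
            (10 * p.1 + (if d == m then 0 else d), 10 * p.2 + (if d == m then 1 else 0))) (0, 0)).2 := by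
  rw [pv_listToInt_horner]
  exact pv_value m j l0 0 0 0 (by ring)

-- L3: the outer loop invariant
theorem pv_loop (m : Int) (l0 : List Int) (js : List Int) :
    ∀ (j' : Int) (acc : List Int),
      ((js.foldl
        (fun (st : List Int × List Int) j =>
          let l' := (pvIndexA l0 m).foldl (fun lc ind => PySem.List.pySetD lc ind j) st.1
          (l', st.2 ++ [pvListToInt l'])) (l0.map (pvSub m j'), acc)).2)
      = acc ++ js.map (fun j =>
          (l0.foldl (fun (p : Int × Int) d =>
              (10 * p.1 + (if d == m then 0 else d), 10 * p.2 + (if d == m then 1 else 0))) (0, 0)).1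
          + j * (l0.foldl (fun (p : Int × Int) d =>
              (10 * p.1 + (if d == m then 0 else d), 10 * p.2 + (if d == m then 1 else 0))) (0, 0)).2) := by
  induction js with
  | nil => intro j' acc; simp
  | cons j rest ih =>
    intro j' acc
    simp only [List.foldl_cons, List.map_cons]
    rw [pv_setAll0 m j j' l0]
    rw [ih j (acc ++ [pvListToInt (l0.map (pvSub m j))])]
    rw [pv_listToInt_sub]
    simp

theorem pv_total (n m : Int) : change_digit n m = change_digit_alt n m := by
  simp only [change_digit, change_digit_alt]
  have key := pv_loop m (pvDigits n) (PySem.List.pyRange 0 10 1) m []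
  rw [pvSub_self] at key
  rw [key]
  simp

-- ===== VERDICT (by name: the statement is the Claim_ definition above) =====
theorem change_digit_spec : Claim_equal_change_digit := by
  intro n m _ _
  exact pv_total n m
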